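-- pv_equiv track=rewrite | github.com/Nestor-02ac/hexai | YGumbel/self_play.py | _split_self_play_chunks
-- ===== SOURCE A (Python) =====
-- def _split_self_play_chunks(num_games, num_workers):
--     target_chunks = min(num_games, max(num_workers, num_workers * 4))
--     base = num_games // target_chunks
--     remainder = num_games % target_chunks
--     chunks = []
--     for chunk_idx in range(target_chunks):
--         chunk_size = base + (1 if chunk_idx < remainder else 0)
--         if chunk_size > 0:
--             chunks.append(chunk_size)
--     return chunks
-- ===== SOURCE B (Python) =====
-- def _split_self_play_chunks(num_games, num_workers):
--     remaining_chunks = min(num_games, max(num_workers, num_workers * 4))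
--     remaining_games = num_games
--     chunks = []
--     while remaining_chunks > 0:
--         size = -(-remaining_games // remaining_chunks)  # ceil division
--         chunks.append(size)
--         remaining_games -= size
--         remaining_chunks -= 1
--     return chunks
-- ===== Notes on version B (the rewrite author's own statement) =====
-- stated objective: alternative
-- what changed: Replaces A's precomputed base/remainder block loop over range(target_chunks) by a greedy while-loop that repeatedly assigns ceil(remaining_games/remaining_chunks) to the next chunk and decrements both counters, maintaining different state (remaining games/chunks) with no base, remainder or positivity guard.
import Mathlib
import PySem

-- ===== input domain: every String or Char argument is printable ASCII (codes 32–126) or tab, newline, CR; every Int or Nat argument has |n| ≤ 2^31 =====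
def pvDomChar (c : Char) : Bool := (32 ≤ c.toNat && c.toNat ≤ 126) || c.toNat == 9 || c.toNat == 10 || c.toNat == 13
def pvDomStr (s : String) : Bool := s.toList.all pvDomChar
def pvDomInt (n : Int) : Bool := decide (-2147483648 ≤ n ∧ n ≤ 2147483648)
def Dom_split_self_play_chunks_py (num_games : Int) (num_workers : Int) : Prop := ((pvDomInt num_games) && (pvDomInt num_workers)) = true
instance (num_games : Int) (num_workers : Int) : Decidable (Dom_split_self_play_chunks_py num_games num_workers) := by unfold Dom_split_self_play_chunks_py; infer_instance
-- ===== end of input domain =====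

-- B replaces A's precomputed base/remainder block loop by a greedy while-loop assigning ceil(remaining/remaining_chunks) per chunk; objective: alternative.

-- ===== PORT A =====
def split_self_play_chunks_py (num_games : Int) (num_workers : Int) : List Int :=
  let target_chunks := min num_games (max num_workers (num_workers * 4))
  let base := PySem.Int.floordiv num_games target_chunks
  let remainder := PySem.Int.mod num_games target_chunks
  (PySem.List.pyRange 0 target_chunks 1).foldl
    (fun chunks chunk_idx =>
      let chunk_size := base + (if chunk_idx < remainder then 1 else 0)
      if chunk_size > 0 then chunks ++ [chunk_size] else chunks) []

-- ===== PORT B =====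
-- the while-loop of Source B: runs while remaining_chunks > 0, decrementing by 1 each step,
-- so it runs exactly remaining_chunks.toNat times; the Nat counter mirrors that count.
def pvAltLoop : Nat → Int → Int → List Int → List Int
  | 0, _, _, chunks => chunks
  | k + 1, remaining_games, remaining_chunks, chunks =>
      let size := -(PySem.Int.floordiv (-remaining_games) remaining_chunks)  -- ceil division
      pvAltLoop k (remaining_games - size) (remaining_chunks - 1) (chunks ++ [size])

def split_self_play_chunks_py_alt (num_games : Int) (num_workers : Int) : List Int :=
  let remaining_chunks := min num_games (max num_workers (num_workers * 4))
  pvAltLoop remaining_chunks.toNat num_games remaining_chunks []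

-- ===== PRECONDITION & SPEC =====
-- A raises ZeroDivisionError exactly when min(num_games, max(num_workers, num_workers*4)) == 0; Pre_ excludes only those inputs.
def Pre_split_self_play_chunks_py (num_games : Int) (num_workers : Int) : Prop :=
  min num_games (max num_workers (num_workers * 4)) ≠ 0
instance (num_games : Int) (num_workers : Int) : Decidable (Pre_split_self_play_chunks_py num_games num_workers) := by unfold Pre_split_self_play_chunks_py; infer_instance

def pvWitness_split_self_play_chunks_py : Int × Int := (10, 3)

def Spec_split_self_play_chunks_py (num_games : Int) (num_workers : Int) (out : List Int) : Prop := out = split_self_play_chunks_py_alt num_games num_workers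
instance (num_games : Int) (num_workers : Int) (out : List Int) : Decidable (Spec_split_self_play_chunks_py num_games num_workers out) := by unfold Spec_split_self_play_chunks_py; infer_instance

-- ===== CLAIM (what is proved, stated in full; the proofs are below) =====
def Claim_equal_split_self_play_chunks_py : Prop := ∀ (num_games : Int) (num_workers : Int), Dom_split_self_play_chunks_py num_games num_workers → Pre_split_self_play_chunks_py num_games num_workers → Spec_split_self_play_chunks_py num_games num_workers (split_self_play_chunks_py num_games num_workers)

-- ===== LEMMAS AND PROOFS =====

theorem pv_map_const {α : Type} (c : Int) (l : List α) (f : α → Int)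
    (h : ∀ x ∈ l, f x = c) : l.map f = List.replicate l.length c := by
  induction l with
  | nil => rfl
  | cons a t ih =>
      simp [List.replicate_succ, h a (by simp), ih (fun x hx => h x (by simp [hx]))]

-- uniqueness of floor-division quotient/remainder for a positive divisor
theorem pv_divmod_unique (n q r t : Int) (ht : 0 < t) (h : n = q * t + r)
    (h0 : 0 ≤ r) (h1 : r < t) :
    PySem.Int.floordiv n t = q ∧ PySem.Int.mod n t = r := by
  have hq : PySem.Int.floordiv n t = q := by
    rw [PySem.Int.floordiv_eq_iff_of_pos ht]
    constructor
    · nlinarith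
    · nlinarith
  refine ⟨hq, ?_⟩
  have := PySem.Int.floordiv_mul_add_mod n t
  rw [hq] at this
  omega

-- the ceiling step: -((-n) // t) = n//t + (1 if n % t > 0 else 0)
theorem pv_ceil_step (n t : Int) (ht : 0 < t) :
    -(PySem.Int.floordiv (-n) t)
      = PySem.Int.floordiv n t + (if 0 < PySem.Int.mod n t then 1 else 0) := by
  have hfm := PySem.Int.floordiv_mul_add_mod n t
  have hr0 : 0 ≤ PySem.Int.mod n t := PySem.Int.mod_nonneg n ht
  have hrt : PySem.Int.mod n t < t := PySem.Int.mod_lt n ht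
  set q := PySem.Int.floordiv n t with hq
  set r := PySem.Int.mod n t with hr
  by_cases hpos : 0 < r
  · have : PySem.Int.floordiv (-n) t = -q - 1 := by
      exact (pv_divmod_unique (-n) (-q - 1) (t - r) t ht (by nlinarith) (by omega) (by omega)).1
    rw [this, if_pos hpos]; ring
  · have hr0' : r = 0 := by omega
    have : PySem.Int.floordiv (-n) t = -q := by
      exact (pv_divmod_unique (-n) (-q) 0 t ht (by nlinarith) (by omega) (by omega)).1
    rw [this, if_neg hpos]; ring

-- main invariant of B's loop for a positive chunk count
theorem pv_altLoop_eq (k : Nat) : ∀ (n : Int) (acc : List Int),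
    pvAltLoop (k + 1) n ((k : Int) + 1) acc
      = acc ++ List.replicate (PySem.Int.mod n ((k : Int) + 1)).toNat
            (PySem.Int.floordiv n ((k : Int) + 1) + 1)
          ++ List.replicate (((k : Int) + 1) - PySem.Int.mod n ((k : Int) + 1)).toNat
            (PySem.Int.floordiv n ((k : Int) + 1)) := by
  induction k with
  | zero =>
      intro n acc
      have h := pv_divmod_unique n n 0 1 (by omega) (by ring) (by omega) (by omega)
      simp [pvAltLoop]
  | succ k ih =>
      intro n acc
      set t : Int := (k : Int) + 1 + 1 with hts
      have ht : 0 < t := by omega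
      have hfm := PySem.Int.floordiv_mul_add_mod n t
      have hr0 : 0 ≤ PySem.Int.mod n t := PySem.Int.mod_nonneg n ht
      have hrt : PySem.Int.mod n t < t := PySem.Int.mod_lt n ht
      set q := PySem.Int.floordiv n t with hq
      set r := PySem.Int.mod n t with hr
      have hsize := pv_ceil_step n t ht
      conv_lhs => rw [show ((k : Nat) + 1 + 1) = (k + 1) + 1 from rfl, pvAltLoop]
      have hc : ((k + 1 : Nat) : Int) + 1 = t := by push_cast; omega
      rw [hc, show t - 1 = (k : Int) + 1 from by omega]
      by_cases hpos : 0 < r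
      · -- size = q + 1; new state: n - q - 1 = q * (t - 1) + (r - 1)
        have hsz : -(PySem.Int.floordiv (-n) t) = q + 1 := by
          rw [hsize, if_pos hpos]
        have hnew := pv_divmod_unique (n - (q + 1)) q (r - 1) ((k : Int) + 1)
          (by omega) (by nlinarith) (by omega) (by omega)
        rw [hsz, ih (n - (q + 1)) (acc ++ [q + 1]), hnew.1, hnew.2, ← hq, ← hr]
        have hrk : r.toNat = (r - 1).toNat + 1 := by omega
        have hseq : (t - r).toNat = (((k : Int) + 1) - (r - 1)).toNat := by omega
        rw [hrk, List.replicate_succ, hseq]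
        simp [List.append_assoc]
      · -- size = q; new state: n - q = q * (t - 1)
        have hr0' : r = 0 := by omega
        have hsz : -(PySem.Int.floordiv (-n) t) = q := by
          rw [hsize, if_neg hpos, add_zero]
        have hnew := pv_divmod_unique (n - q) q 0 ((k : Int) + 1)
          (by omega) (by nlinarith) (by omega) (by omega)
        rw [hsz, ih (n - q) (acc ++ [q]), hnew.1, hnew.2, ← hq, ← hr, hr0']
        rw [show ((t : Int) - 0).toNat = (((k : Int) + 1) - 0).toNat + 1 from by omega,
          List.replicate_succ]
        simp [List.append_assoc]

-- ===== VERDICT (by name: the statement is the Claim_ definition above) =====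
theorem split_self_play_chunks_py_spec : Claim_equal_split_self_play_chunks_py := by
  intro ng nw _ hpre
  unfold Spec_split_self_play_chunks_py split_self_play_chunks_py split_self_play_chunks_py_alt
  dsimp only
  set t := min ng (max nw (nw * 4)) with ht
  have hpre' : t ≠ 0 := hpre
  by_cases hpos : 0 < t
  · -- positive target: A's loop appends base+1 for idx < remainder, base otherwise;
    -- B's greedy loop produces the same block list by pv_altLoop_eq
    have hng : t ≤ ng := min_le_left _ _
    have hbase : 1 ≤ PySem.Int.floordiv ng t := by
      rw [PySem.Int.le_floordiv_iff_mul_le hpos]; omega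
    set base := PySem.Int.floordiv ng t with hb
    set r := PySem.Int.mod ng t with hr
    have hr0 : 0 ≤ r := PySem.Int.mod_nonneg ng hpos
    have hrt : r < t := PySem.Int.mod_lt ng hpos
    -- A side
    rw [PySem.List.foldl_append_ite
        (p := fun i => base + (if i < r then 1 else 0) > 0)
        (f := fun i => base + (if i < r then 1 else 0))]
    have hfilter : (PySem.List.pyRange 0 t 1).filter
        (fun i => decide (base + (if i < r then 1 else 0) > 0)) = PySem.List.pyRange 0 t 1 := by
      apply List.filter_eq_self.2
      intro i _
      simp only [decide_eq_true_eq]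
      split <;> omega
    rw [hfilter, PySem.List.pyRange_one_append 0 r t (by omega) (by omega), List.map_append]
    have h1 := pv_map_const (base + 1) (PySem.List.pyRange 0 r)
      (fun i => base + if i < r then 1 else 0) (fun x hx => by
        have h := (PySem.List.mem_pyRange_one).1 hx
        simp [if_pos h.2])
    have h2 := pv_map_const base (PySem.List.pyRange r t)
      (fun i => base + if i < r then 1 else 0) (fun x hx => by
        have h := (PySem.List.mem_pyRange_one).1 hx
        simp [if_neg (by omega : ¬ x < r)])
    rw [h1, h2, PySem.List.length_pyRange_one, PySem.List.length_pyRange_one]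
    -- B side
    obtain ⟨k, hk⟩ : ∃ k : Nat, t = (k : Int) + 1 :=
      ⟨(t - 1).toNat, by omega⟩
    have htn : t.toNat = k + 1 := by omega
    rw [htn, hk, pv_altLoop_eq k ng [], ← hk, ← hb, ← hr]
    simp
  · -- negative target: A's range is empty and B's loop count is 0; both sides are []
    have hneg : t < 0 := by omega
    rw [PySem.List.pyRange_one_eq_nil (by omega : t ≤ (0:Int))]
    have : t.toNat = 0 := by omega
    rw [this]
    rfl
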